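-- pv_equiv track=rewrite | github.com/AthharPro/zypher | python-scanner/zypher_scanner/db_ruls/cicd-vuln-005.py | _find_step_line
-- ===== SOURCE A (Python) =====
-- from typing import List, Dict, Any
--
-- def _find_step_line(file_lines: List[str], job_name: str, step_idx: int) -> int:
--     job_line = -1
--     steps_line = -1
--     step_count = -1
--     for i, line in enumerate(file_lines):
--         if line.strip().startswith(f"{job_name}:"):
--             job_line = i
--             break
--     if job_line < 0:
--         return -1
--     for i in range(job_line, len(file_lines)):
--         if "steps:" in file_lines[i]:
--             steps_line = i
--             break
--     if steps_line < 0: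
--         return -1
--     for i in range(steps_line + 1, len(file_lines)):
--         if file_lines[i].strip().startswith("- "):
--             step_count += 1
--             if step_count == step_idx:
--                 return i
--     return -1
-- ===== SOURCE B (Python) =====
-- from typing import List
--
-- def _find_step_line(file_lines: List[str], job_name: str, step_idx: int) -> int:
--     # One pass: state 0 = seeking the job line, 1 = seeking 'steps:', 2 = counting steps.
--     state = 0
--     count = -1
--     prefix = f"{job_name}:"
--     for i, line in enumerate(file_lines):
--         if state == 0:
--             if line.strip().startswith(prefix):
--                 state = 2 if "steps:" in line else 1
--         elif state == 1:
--             if "steps:" in line: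
--                 state = 2
--         else:
--             if line.strip().startswith("- "):
--                 count += 1
--                 if count == step_idx:
--                     return i
--     return -1
-- ===== Notes on version B (the rewrite author's own statement) =====
-- stated objective: faster
-- what changed: Replaced A's three sequential index-based scans (find job, find 'steps:' from the job line, count '- ' steps) by a single loop over enumerate(file_lines) driving a three-state machine with one step counter, computing the job prefix string once instead of per line.
import Mathlib
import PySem

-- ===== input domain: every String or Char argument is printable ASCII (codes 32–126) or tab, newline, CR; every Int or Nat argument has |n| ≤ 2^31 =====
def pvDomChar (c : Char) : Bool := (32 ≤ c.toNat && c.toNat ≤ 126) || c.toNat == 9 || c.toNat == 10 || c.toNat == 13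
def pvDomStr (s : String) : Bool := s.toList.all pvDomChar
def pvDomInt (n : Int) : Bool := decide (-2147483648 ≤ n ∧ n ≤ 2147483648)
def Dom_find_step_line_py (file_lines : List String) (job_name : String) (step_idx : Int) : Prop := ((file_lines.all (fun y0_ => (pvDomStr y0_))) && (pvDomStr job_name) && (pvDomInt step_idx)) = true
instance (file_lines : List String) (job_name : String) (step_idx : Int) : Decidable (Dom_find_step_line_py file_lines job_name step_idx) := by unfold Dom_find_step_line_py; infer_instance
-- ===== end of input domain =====

-- B merges A's three sequential scans into one enumerate loop driving a three-state machine (objective: alternative decomposition).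

-- ===== PORT A =====
-- third loop: for i in range(steps_line + 1, len): count '- ' lines, return i when count == step_idx
def pvA_phase3 (ls : List String) (i : Int) (cnt : Int) (target : Int) : Int :=
  match ls with
  | [] => -1
  | l :: rest =>
    if PySem.Str.startswith (PySem.Str.strip l) "- " then
      (if cnt + 1 = target then i else pvA_phase3 rest (i + 1) (cnt + 1) target)
    else pvA_phase3 rest (i + 1) cnt target

-- second loop: for i in range(job_line, len): first line containing "steps:" (inclusive of the job line)
def pvA_phase2 (ls : List String) (i : Int) (target : Int) : Int :=
  match ls with
  | [] => -1
  | l :: rest =>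
    if PySem.Str.isIn "steps:" l then pvA_phase3 rest (i + 1) (-1) target
    else pvA_phase2 rest (i + 1) target

-- first loop: first line whose strip() starts with f"{job_name}:"
def pvA_phase1 (ls : List String) (i : Int) (job_name : String) (target : Int) : Int :=
  match ls with
  | [] => -1
  | l :: rest =>
    if PySem.Str.startswith (PySem.Str.strip l) (job_name ++ ":") then pvA_phase2 (l :: rest) i target
    else pvA_phase1 rest (i + 1) job_name target

def find_step_line_py (file_lines : List String) (job_name : String) (step_idx : Int) : Int :=
  pvA_phase1 file_lines 0 job_name step_idx

-- ===== PORT B =====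
-- single loop: state 0 = seeking the job line, 1 = seeking "steps:", 2 = counting steps
def pvB_go (ls : List String) (i : Int) (state : Nat) (count : Int) (pfx : String) (target : Int) : Int :=
  match ls with
  | [] => -1
  | l :: rest =>
    if state = 0 then
      if PySem.Str.startswith (PySem.Str.strip l) pfx then
        pvB_go rest (i + 1) (if PySem.Str.isIn "steps:" l then 2 else 1) count pfx target
      else pvB_go rest (i + 1) 0 count pfx target
    else if state = 1 then
      pvB_go rest (i + 1) (if PySem.Str.isIn "steps:" l then 2 else 1) count pfx target
    else
      if PySem.Str.startswith (PySem.Str.strip l) "- " then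
        (if count + 1 = target then i else pvB_go rest (i + 1) 2 (count + 1) pfx target)
      else pvB_go rest (i + 1) 2 count pfx target

def find_step_line_py_alt (file_lines : List String) (job_name : String) (step_idx : Int) : Int :=
  pvB_go file_lines 0 0 (-1) (job_name ++ ":") step_idx

-- ===== PRECONDITION & SPEC =====
def Spec_find_step_line_py (file_lines : List String) (job_name : String) (step_idx : Int) (out : Int) : Prop := out = find_step_line_py_alt file_lines job_name step_idx
instance (file_lines : List String) (job_name : String) (step_idx : Int) (out : Int) : Decidable (Spec_find_step_line_py file_lines job_name step_idx out) := by unfold Spec_find_step_line_py; infer_instance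

-- ===== CLAIM (what is proved, stated in full; the proofs are below) =====
def Claim_equal_find_step_line_py : Prop := ∀ (file_lines : List String) (job_name : String) (step_idx : Int), Dom_find_step_line_py file_lines job_name step_idx → Spec_find_step_line_py file_lines job_name step_idx (find_step_line_py file_lines job_name step_idx)

-- ===== LEMMAS AND PROOFS =====
theorem pvB_state2 (ls : List String) (i cnt t : Int) (p : String) :
    pvB_go ls i 2 cnt p t = pvA_phase3 ls i cnt t := by
  induction ls generalizing i cnt with
  | nil => rfl
  | cons l rest ih =>
    show (if (2 : Nat) = 0 then _ else if (2 : Nat) = 1 then _ else _) = _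
    rw [if_neg (by decide), if_neg (by decide)]
    simp only [pvA_phase3]
    split_ifs
    · rfl
    · exact ih (i + 1) (cnt + 1)
    · exact ih (i + 1) cnt

theorem pvB_state1 (ls : List String) (i t : Int) (p : String) :
    pvB_go ls i 1 (-1) p t = pvA_phase2 ls i t := by
  induction ls generalizing i with
  | nil => rfl
  | cons l rest ih =>
    show (if (1 : Nat) = 0 then _ else if (1 : Nat) = 1 then _ else _) = _
    rw [if_neg (by decide), if_pos rfl]
    simp only [pvA_phase2]
    by_cases h : PySem.Str.isIn "steps:" l = true
    · rw [if_pos h, if_pos h]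
      exact pvB_state2 rest (i + 1) (-1) t p
    · rw [if_neg h, if_neg h]
      exact ih (i + 1)

theorem pvB_state0 (ls : List String) (i t : Int) (job : String) :
    pvB_go ls i 0 (-1) (job ++ ":") t = pvA_phase1 ls i job t := by
  induction ls generalizing i with
  | nil => rfl
  | cons l rest ih =>
    show (if (0 : Nat) = 0 then _ else _) = _
    rw [if_pos rfl]
    simp only [pvA_phase1]
    by_cases hj : PySem.Str.startswith (PySem.Str.strip l) (job ++ ":") = true
    · rw [if_pos hj, if_pos hj]
      simp only [pvA_phase2]
      by_cases hs : PySem.Str.isIn "steps:" l = true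
      · rw [if_pos hs, if_pos hs]
        exact pvB_state2 rest (i + 1) (-1) t (job ++ ":")
      · rw [if_neg hs, if_neg hs]
        exact pvB_state1 rest (i + 1) t (job ++ ":")
    · rw [if_neg hj, if_neg hj]
      exact ih (i + 1)

-- ===== VERDICT (by name: the statement is the Claim_ definition above) =====
theorem find_step_line_py_spec : Claim_equal_find_step_line_py := by
  intro ls job t _
  unfold Spec_find_step_line_py find_step_line_py find_step_line_py_alt
  exact (pvB_state0 ls 0 t job).symm
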